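-- pv_equiv track=rewrite | github.com/mostafaSataki/HKC | Utility.py | getNumericLabels
-- ===== SOURCE A (Python) =====
-- def getNumericLabels(str_labels):
--     unique_labels = list(set(str_labels))
--     unique_labels = sorted(unique_labels)
--
--     labels_tuple = {}
--     labels_tuple_inv = {}
--     for i,u in enumerate( unique_labels):
--       labels_tuple[i] = u
--       labels_tuple_inv[u] = i
--
--     result = []
--     for str_label in str_labels:
--         result.append( labels_tuple_inv[str_label])
--
--     return result,labels_tuple
-- ===== SOURCE B (Python) =====
-- def getNumericLabels(str_labels):
--     # rank-by-counting + bucket placement: no sort, no inverse hash lookup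
--     unique = set(str_labels)
--     inv = {u: sum(1 for v in unique if v < u) for u in unique}
--     arr = [None] * len(unique)
--     for u, i in inv.items():
--         arr[i] = u
--     labels_tuple = {i: u for i, u in enumerate(arr)}
--     result = [inv[s] for s in str_labels]
--     return result, labels_tuple
-- ===== Notes on version B (the rewrite author's own statement) =====
-- stated objective: alternative
-- what changed: Replaces sort-then-inverse-dict by comparison counting: each unique label's index is the count of smaller unique labels, and the ordered label table is produced by bucket-placing each label at its rank into a preallocated array; no sorting step at all, trading A's k log k sort for a quadratic counting pass over the unique labels (slower when there are many distinct labels).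
import Mathlib
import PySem

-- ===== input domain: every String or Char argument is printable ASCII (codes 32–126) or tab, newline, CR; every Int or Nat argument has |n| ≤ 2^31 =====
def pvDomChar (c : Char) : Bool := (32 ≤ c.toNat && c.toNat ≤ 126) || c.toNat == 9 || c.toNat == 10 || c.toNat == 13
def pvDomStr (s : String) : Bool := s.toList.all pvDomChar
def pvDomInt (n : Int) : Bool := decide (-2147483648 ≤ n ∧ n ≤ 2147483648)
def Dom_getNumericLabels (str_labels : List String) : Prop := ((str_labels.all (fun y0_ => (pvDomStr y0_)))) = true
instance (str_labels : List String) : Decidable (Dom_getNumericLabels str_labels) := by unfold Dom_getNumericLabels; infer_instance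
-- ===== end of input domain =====

-- B replaces sort + inverse dict by comparison counting: each unique label's index is the number of
-- smaller unique labels, and the ordered table comes from bucket-placing each label at its rank
-- (objective: alternative; return value only, no mutation).

-- ===== PORT A =====
def getNumericLabels (str_labels : List String) : List Int × (List (Int × String)) :=
  let unique_labels : List String := PySem.Set.ofList str_labels
  let unique_labels2 := PySem.List.sorted unique_labels (fun x => x)
  let dicts := (PySem.List.enumerate unique_labels2).foldl
    (fun (p : PySem.Dict Int String × PySem.Dict String Int) iu =>
      (p.1.insert iu.1 iu.2, p.2.insert iu.2 iu.1))
    (PySem.Dict.empty, PySem.Dict.empty)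
  -- labels_tuple_inv[str_label]: the key is always present (it came from set(str_labels)),
  -- so the total getD with default 0 is exact (the KeyError branch is unreachable)
  let result := str_labels.foldl (fun (acc : List Int) s => acc ++ [dicts.2.getD s 0]) []
  (result, dicts.1.items)

-- ===== PORT B =====
def getNumericLabels_alt (str_labels : List String) : List Int × (List (Int × String)) :=
  let unique : List String := PySem.Set.ofList str_labels
  -- inv = {u: sum(1 for v in unique if v < u) for u in unique}
  let inv : PySem.Dict String Int := unique.foldl
    (fun (d : PySem.Dict String Int) u =>
      d.insert u ((unique.countP (fun v => decide (v < u)) : Nat) : Int)) PySem.Dict.empty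
  -- arr = [None]*len(unique); for u,i in inv.items(): arr[i] = u
  -- ("" stands for Python's None placeholder; every slot is written, and the rank i is a
  --  nonnegative count < len(unique), so .toNat and the in-range List.set are exact here)
  let arr : List String := inv.items.foldl
    (fun (a : List String) ui => a.set ui.2.toNat ui.1) (List.replicate unique.length "")
  let labels_tuple := (PySem.List.enumerate arr).foldl
    (fun (d : PySem.Dict Int String) iu => d.insert iu.1 iu.2) PySem.Dict.empty
  -- result = [inv[s] for s in str_labels]: key always present, total getD is exact
  let result := str_labels.map (fun s => inv.getD s 0)
  (result, labels_tuple.items)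

-- ===== PRECONDITION & SPEC =====
def Spec_getNumericLabels (str_labels : List String) (out : List Int × (List (Int × String))) : Prop := out = getNumericLabels_alt str_labels
instance (str_labels : List String) (out : List Int × (List (Int × String))) : Decidable (Spec_getNumericLabels str_labels out) := by unfold Spec_getNumericLabels; infer_instance

-- ===== CLAIM (what is proved, stated in full; the proofs are below) =====
def Claim_equal_getNumericLabels : Prop := ∀ (str_labels : List String), Dom_getNumericLabels str_labels → Spec_getNumericLabels str_labels (getNumericLabels str_labels)

-- ===== LEMMAS AND PROOFS =====

-- A's single loop filling the two dicts equals two independent insert-folds.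
lemma pvPairFold (l : List (Int × String)) (d1 : PySem.Dict Int String) (d2 : PySem.Dict String Int) :
    l.foldl (fun p iu => (p.1.insert iu.1 iu.2, p.2.insert iu.2 iu.1)) (d1, d2)
      = (l.foldl (fun d iu => d.insert iu.1 iu.2) d1,
         l.foldl (fun d iu => d.insert iu.2 iu.1) d2) := by
  induction l generalizing d1 d2 with
  | nil => rfl
  | cons a t ih => simpa using ih (d1.insert a.1 a.2) (d2.insert a.2 a.1)

-- The inverse dict built from enumerate(us) looks up index k for us[k] (us without duplicates).
lemma pvInvLookup (us : List String) (hnd : us.Nodup) {k : Nat} (hk : k < us.length) :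
    ((PySem.List.enumerate us).foldl (fun d iu => d.insert iu.2 iu.1)
        (PySem.Dict.empty : PySem.Dict String Int)).getD us[k] 0 = (k : Int) := by
  have hitems : ((PySem.List.enumerate us).foldl (fun d iu => d.insert iu.2 iu.1)
      (PySem.Dict.empty : PySem.Dict String Int)).items
      = PySem.Dict.empty.items ++ (PySem.List.enumerate us).map (fun iu => (iu.2, iu.1)) := by
    apply PySem.Dict.items_foldl_insert_fresh (PySem.List.enumerate us) (fun iu => iu.2) (fun iu => iu.1)
    · intro a _; exact PySem.Dict.contains_empty _
    · rw [PySem.List.map_snd_enumerate]; exact hnd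
  have hmem : (us[k], (k : Int)) ∈ ((PySem.List.enumerate us).foldl (fun d iu => d.insert iu.2 iu.1)
      (PySem.Dict.empty : PySem.Dict String Int)).items := by
    rw [hitems]
    have hin : ((0 : Int) + (k : Nat), us[k]) ∈ PySem.List.enumerate us :=
      (PySem.List.mem_enumerate_iff _ _ _).mpr ⟨k, hk, rfl⟩
    have h2 : (us[k], (0 : Int) + (k : Nat)) ∈
        (PySem.List.enumerate us).map (fun iu => (iu.2, iu.1)) :=
      List.mem_map_of_mem (f := fun iu : Int × String => (iu.2, iu.1)) hin
    simp only [zero_add] at h2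
    exact List.mem_append.mpr (Or.inr h2)
  have hndk : ((PySem.List.enumerate us).foldl (fun d iu => d.insert iu.2 iu.1)
      (PySem.Dict.empty : PySem.Dict String Int)).keys.Nodup :=
    PySem.Dict.nodup_keys_foldl_insert_key (PySem.List.enumerate us) (fun iu => iu.2)
      (fun _ iu => iu.1) PySem.Dict.empty (by simp [PySem.Dict.keys_empty])
  exact PySem.Dict.getD_of_mem_items _ hmem hndk 0

-- On a strictly increasing list, the number of elements below us[k] is k.
lemma pvRankEq (us : List String) (hp : us.Pairwise (· < ·)) {k : Nat} (hk : k < us.length) :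
    us.countP (fun v => decide (v < us[k])) = k := by
  have hmono : ∀ i j (_ : i < us.length) (_ : j < us.length), i < j → us[i] < us[j] := by
    intro i j hi hj hij
    exact List.pairwise_iff_getElem.mp hp i j hi hj hij
  have hsplit : us.countP (fun v => decide (v < us[k]))
      = (us.take k).countP (fun v => decide (v < us[k]))
        + (us.drop k).countP (fun v => decide (v < us[k])) := by
    have h0 := congrArg (List.countP (fun v => decide (v < us[k])))
      (List.take_append_drop k us)
    rw [List.countP_append] at h0
    omega
  have htake : (us.take k).countP (fun v => decide (v < us[k])) = k := by
    have hlen : (us.take k).length = k := by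
      rw [List.length_take]; omega
    have hall : ∀ a ∈ us.take k, (fun v => decide (v < us[k])) a = true := by
      intro a ha
      obtain ⟨i, hi, hia⟩ := List.mem_iff_getElem.mp ha
      have hi' : i < k := by omega
      have : (us.take k)[i] = us[i] := List.getElem_take
      rw [← hia, this]
      exact decide_eq_true (hmono i k (by omega) hk hi')
    rw [List.countP_eq_length.mpr hall, hlen]
  have hdrop : (us.drop k).countP (fun v => decide (v < us[k])) = 0 := by
    apply List.countP_eq_zero.mpr
    intro a ha
    obtain ⟨i, hi, hia⟩ := List.mem_iff_getElem.mp ha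
    have hlen : (us.drop k).length = us.length - k := List.length_drop
    have : (us.drop k)[i] = us[k + i] := by
      rw [List.getElem_drop]
    rw [← hia, this]
    have hge : us[k] ≤ us[k + i] := by
      rcases Nat.eq_zero_or_pos i with h0 | h0
      · subst h0; simp
      · exact le_of_lt (hmono k (k + i) hk (by omega) (by omega))
    simp [not_lt.mpr hge]
  omega

-- B's rank dict: items are exactly (u, rank u) over the distinct labels, keys unique.
lemma pvRankItems (unique : List String) (hnd : unique.Nodup) :
    (unique.foldl (fun (d : PySem.Dict String Int) u =>
        d.insert u ((unique.countP (fun v => decide (v < u)) : Nat) : Int)) PySem.Dict.empty).items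
      = unique.map (fun u => (u, ((unique.countP (fun v => decide (v < u)) : Nat) : Int))) := by
  have h := PySem.Dict.items_foldl_insert_fresh unique (fun u => u)
    (fun u => ((unique.countP (fun v => decide (v < u)) : Nat) : Int))
    (PySem.Dict.empty : PySem.Dict String Int)
    (by intro a _; exact PySem.Dict.contains_empty _) (by simpa using hnd)
  simpa using h

lemma pvRankKeysNodup (unique : List String) :
    (unique.foldl (fun (d : PySem.Dict String Int) u =>
        d.insert u ((unique.countP (fun v => decide (v < u)) : Nat) : Int)) PySem.Dict.empty).keys.Nodup :=
  PySem.Dict.nodup_keys_foldl_insert_key unique (fun u => u)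
    (fun _ u => ((unique.countP (fun v => decide (v < u)) : Nat) : Int)) PySem.Dict.empty
    (by simp [PySem.Dict.keys_empty])

-- Setting does not change the length through the placement fold.
lemma pvFoldlSetLength (g : String → Nat) :
    ∀ (l : List String) (init : List String),
      (l.foldl (fun a u => a.set (g u) u) init).length = init.length := by
  intro l
  induction l with
  | nil => intro init; rfl
  | cons u t ih => intro init; simpa [List.length_set] using ih (init.set (g u) u)

-- Bucket placement: folding a.set (g u) u over labels of us, where g sends us[j] to j,
-- fills slot j with us[j] as soon as us[j] occurs in the processed list.
lemma pvPlace (us : List String) (g : String → Nat)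
    (hg : ∀ (j : Nat) (h : j < us.length), g us[j] = j) :
    ∀ (l : List String) (init : List String), (∀ u ∈ l, u ∈ us) → init.length = us.length →
      ∀ (j : Nat) (hj : j < us.length),
        (l.foldl (fun a u => a.set (g u) u) init)[j]? = if us[j] ∈ l then some us[j] else init[j]? := by
  intro l
  induction l with
  | nil => intro init _ _ j hj; simp
  | cons u t ih =>
    intro init hmem hlen j hj
    have hlen' : (init.set (g u) u).length = us.length := by
      simpa [List.length_set] using hlen
    rw [List.foldl_cons,
        ih (init.set (g u) u) (fun x hx => hmem x (List.mem_cons_of_mem u hx)) hlen' j hj]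
    by_cases h1 : us[j] ∈ t
    · simp [h1]
    · rw [if_neg h1]
      by_cases h2 : us[j] = u
      · rw [if_pos (by rw [h2]; exact List.mem_cons_self)]
        have hgj : g u = j := by rw [← h2]; exact hg j hj
        have hjl : j < init.length := by omega
        rw [hgj, h2]
        simp [hjl]
      · rw [if_neg (by simp [List.mem_cons, h1, h2])]
        have hu : u ∈ us := hmem u (List.mem_cons_self)
        obtain ⟨j', hj', hj'u⟩ := List.mem_iff_getElem.mp hu
        have hgu : g u = j' := by rw [← hj'u]; exact hg j' hj'
        have hne : g u ≠ j := by
          rw [hgu]; intro hEq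
          subst hEq
          exact h2 hj'u
        rw [List.getElem?_set_ne hne]

-- ===== VERDICT (by name: the statement is the Claim_ definition above) =====
theorem getNumericLabels_spec : Claim_equal_getNumericLabels := by
  intro xs _
  unfold Spec_getNumericLabels getNumericLabels getNumericLabels_alt
  simp only [pvPairFold, PySem.List.foldl_append_singleton_eq_map]
  set unique : List String := PySem.Set.ofList xs with hunique
  set us : List String := PySem.List.sorted unique (fun x => x) with hus
  have hperm : us.Perm unique := PySem.List.sorted_perm _ _ _
  have hndu : unique.Nodup := PySem.Set.nodup_ofList xs
  have hnd : us.Nodup := hperm.nodup_iff.mpr hndu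
  have hp : us.Pairwise (· < ·) := PySem.List.sorted_ofList_pairwise_lt xs
  have hrank : ∀ (k : Nat) (hk : k < us.length),
      unique.countP (fun v => decide (v < us[k])) = k := by
    intro k hk
    rw [← hperm.countP_eq (fun v => decide (v < us[k]))]  -- count over us instead
    exact pvRankEq us hp hk
  -- B's rank dict looks up k at us[k]
  have hinv : ∀ (k : Nat) (hk : k < us.length),
      (unique.foldl (fun (d : PySem.Dict String Int) u =>
          d.insert u ((unique.countP (fun v => decide (v < u)) : Nat) : Int))
          PySem.Dict.empty).getD us[k] 0 = (k : Int) := by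
    intro k hk
    have hmemu : us[k] ∈ unique := hperm.mem_iff.mp (List.getElem_mem hk)
    have hmemi : (us[k], ((unique.countP (fun v => decide (v < us[k])) : Nat) : Int))
        ∈ unique.map (fun u => (u, ((unique.countP (fun v => decide (v < u)) : Nat) : Int))) :=
      List.mem_map_of_mem hmemu
    rw [hrank k hk] at hmemi
    rw [← pvRankItems unique hndu] at hmemi
    exact PySem.Dict.getD_of_mem_items _ hmemi (pvRankKeysNodup unique) 0
  -- B's placement array equals the sorted unique list
  have harr : (unique.foldl (fun (d : PySem.Dict String Int) u =>
        d.insert u ((unique.countP (fun v => decide (v < u)) : Nat) : Int))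
        PySem.Dict.empty).items.foldl
        (fun (a : List String) ui => a.set ui.2.toNat ui.1) (List.replicate unique.length "") = us := by
    rw [pvRankItems unique hndu, List.foldl_map]
    have hlen : us.length = unique.length := hperm.length_eq
    have hstep : (fun (a : List String) u =>
        a.set ((unique.countP (fun v => decide (v < u)) : Nat) : Int).toNat u)
        = fun a u => a.set (unique.countP (fun v => decide (v < u))) u := by
      funext a u; simp
    rw [hstep]
    apply List.ext_getElem?
    intro j
    by_cases hj : j < us.length
    · rw [pvPlace us (fun u => unique.countP (fun v => decide (v < u)))
          (fun j hj => hrank j hj) unique (List.replicate unique.length "")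
          (fun u hu => hperm.mem_iff.mpr hu) (by simp [hlen]) j hj]
      rw [if_pos (hperm.mem_iff.mp (List.getElem_mem hj))]
      exact (List.getElem?_eq_getElem hj).symm
    · have h1 : (unique.foldl (fun a u =>
          a.set (unique.countP (fun v => decide (v < u))) u)
          (List.replicate unique.length "")).length = us.length := by
        rw [pvFoldlSetLength (fun u => unique.countP (fun v => decide (v < u)))]
        simp [hlen]
      have hfl : (unique.foldl (fun a u =>
          a.set (unique.countP (fun v => decide (v < u))) u)
          (List.replicate unique.length ""))[j]? = none :=
        List.getElem?_eq_none (by rw [h1]; omega)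
      have hus0 : us[j]? = none := List.getElem?_eq_none (by omega)
      rw [hfl, hus0]
  refine Prod.ext ?_ ?_
  · -- result lists
    simp only
    apply List.map_congr_left
    intro s hs
    have hsus : s ∈ us := by
      rw [hus, PySem.List.mem_sorted, hunique]
      exact (PySem.Set.mem_ofList _ _).mpr hs
    obtain ⟨k, hk, hks⟩ := List.mem_iff_getElem.mp hsus
    rw [← hks, pvInvLookup us hnd hk, hinv k hk]
  · -- labels_tuple items
    simp only [harr]
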